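-- pv_equiv track=rewrite | github.com/linheart/2nd_lab | python/1st_ex/main.py | func
-- ===== SOURCE A (Python) =====
-- def func(S, M, N):
--     if S * M > (S - S // 7) * N:
--         return -1
--
--     food = N
--     days = 1
--
--     while food <= S * M:
--         food += N
--         days += 1
--
--     return days - 1
-- ===== SOURCE B (Python) =====
-- def func(S, M, N):
--     total = S * M
--     if total > (S - S // 7) * N:
--         return -1
--     if N <= 0 or total < N:
--         return 0
--     return total // N
-- ===== Notes on version B (the rewrite author's own statement) =====
-- stated objective: faster
-- what changed: replaced the increment-counting while loop by a closed-form floor division S*M//N after the cap check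
import Mathlib
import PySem

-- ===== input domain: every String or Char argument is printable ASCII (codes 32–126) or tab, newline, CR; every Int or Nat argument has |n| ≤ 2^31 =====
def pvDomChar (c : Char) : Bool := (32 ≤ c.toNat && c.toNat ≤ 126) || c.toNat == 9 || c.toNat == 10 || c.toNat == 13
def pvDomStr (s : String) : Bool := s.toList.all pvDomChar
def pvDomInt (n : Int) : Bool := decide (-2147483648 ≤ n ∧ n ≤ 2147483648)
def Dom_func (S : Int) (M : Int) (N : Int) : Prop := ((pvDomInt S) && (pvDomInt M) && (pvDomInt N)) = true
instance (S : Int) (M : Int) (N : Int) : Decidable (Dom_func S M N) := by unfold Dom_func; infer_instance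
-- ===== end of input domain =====

-- B replaces A's increment-counting while loop by a closed-form floor division (faster).

-- ===== PORT A =====
-- the while loop; the '0 < N' conjunct is a totality guard only: when N ≤ 0 and the
-- loop body would run, the Python loop diverges (such inputs are outside Pre_func)
def funcLoop (total : Int) (N : Int) (food : Int) (days : Int) : Int :=
  if h : food ≤ total ∧ 0 < N then funcLoop total N (food + N) (days + 1) else days
termination_by (total + 1 - food).toNat
decreasing_by omega

def func (S : Int) (M : Int) (N : Int) : Int :=
  if S * M > (S - PySem.Int.floordiv S 7) * N then -1
  else funcLoop (S * M) N N 1 - 1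

-- ===== PORT B =====
def func_alt (S : Int) (M : Int) (N : Int) : Int :=
  let total := S * M
  if total > (S - PySem.Int.floordiv S 7) * N then -1
  else if N ≤ 0 ∨ total < N then 0
  else PySem.Int.floordiv total N

-- ===== PRECONDITION & SPEC =====
-- Pre_ excludes exactly the inputs on which A's while loop never terminates
-- (N ≤ 0 with the loop entered and the cap check not taken); A returns on all other inputs.
def Pre_func (S : Int) (M : Int) (N : Int) : Prop :=
  ¬ (N ≤ 0 ∧ S * M ≤ (S - PySem.Int.floordiv S 7) * N ∧ N ≤ S * M)
instance (S : Int) (M : Int) (N : Int) : Decidable (Pre_func S M N) := by unfold Pre_func; infer_instance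
def pvWitness_func : Int × Int × Int := (7, 2, 3)
def Spec_func (S : Int) (M : Int) (N : Int) (out : Int) : Prop := out = func_alt S M N
instance (S : Int) (M : Int) (N : Int) (out : Int) : Decidable (Spec_func S M N out) := by unfold Spec_func; infer_instance

-- ===== CLAIM (what is proved, stated in full; the proofs are below) =====
def Claim_equal_func : Prop := ∀ (S : Int) (M : Int) (N : Int), Dom_func S M N → Pre_func S M N → Spec_func S M N (func S M N)

-- ===== LEMMAS AND PROOFS =====

theorem funcLoop_closed (total N : Int) (hN : 0 < N) :
    ∀ food days, funcLoop total N food days = days + max 0 (PySem.Int.floordiv (total - food) N + 1) := by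
  intro food days
  induction food, days using funcLoop.induct total N with
  | case1 food days h ih =>
    rw [funcLoop, dif_pos h, ih]
    have h1 : PySem.Int.floordiv (total - (food + N)) N = PySem.Int.floordiv (total - food) N - 1 := by
      have hq := (PySem.Int.floordiv_eq_iff_of_pos (a := total - food) (b := N) hN
        (q := PySem.Int.floordiv (total - food) N)).mp rfl
      rw [(PySem.Int.floordiv_eq_iff_of_pos hN)]
      constructor <;> nlinarith [hq.1, hq.2]
    have h2 : 0 ≤ PySem.Int.floordiv (total - food) N := by
      rw [PySem.Int.le_floordiv_iff_mul_le hN]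
      nlinarith [h.1]
    rw [h1]; omega
  | case2 food days h =>
    rw [funcLoop, dif_neg h]
    have hgt : total < food := by
      by_contra hc
      exact h ⟨by omega, hN⟩
    have h3 : PySem.Int.floordiv (total - food) N < 0 := by
      rw [PySem.Int.floordiv_lt_iff_lt_mul hN]
      nlinarith
    omega

theorem func_spec : Claim_equal_func := by
  intro S M N _ hpre
  unfold Spec_func func func_alt
  by_cases hcap : S * M > (S - PySem.Int.floordiv S 7) * N
  · rw [if_pos hcap, if_pos hcap]
  · rw [if_neg hcap, if_neg hcap]
    unfold Pre_func at hpre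
    by_cases hN : 0 < N
    · rw [funcLoop_closed (S * M) N hN N 1]
      have hsub : PySem.Int.floordiv (S * M - N) N = PySem.Int.floordiv (S * M) N - 1 := by
        have hq := (PySem.Int.floordiv_eq_iff_of_pos (a := S * M) (b := N) hN
          (q := PySem.Int.floordiv (S * M) N)).mp rfl
        rw [(PySem.Int.floordiv_eq_iff_of_pos hN)]
        constructor <;> nlinarith [hq.1, hq.2]
      rw [hsub]
      by_cases hlt : S * M < N
      · have h0 : PySem.Int.floordiv (S * M) N < 1 := by
          rw [PySem.Int.floordiv_lt_iff_lt_mul hN]; omega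
        rw [if_pos (Or.inr hlt)]
        omega
      · have h1 : 1 ≤ PySem.Int.floordiv (S * M) N := by
          rw [PySem.Int.le_floordiv_iff_mul_le hN]; omega
        rw [if_neg (by omega)]
        omega
    · -- N ≤ 0: Pre_ forces S*M < N, so the loop body never runs
      have hlt : S * M < N := by omega
      rw [funcLoop, dif_neg (by omega), if_pos (Or.inl (by omega))]
      decide
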